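-- pv_equiv track=rewrite | github.com/VoiceofSiren/StudyingProgramming | Python/Coding Test/Programmers/lv0/p-115.py | solution
-- ===== SOURCE A (Python) =====
-- def solution(arr):
--     row, column = len(arr), len(arr[0])
--     answer = [
--         [ 0 for j in range(max(row, column))]
--         for i in range(max(row, column))
--     ]
--     for i in range(row):
--         for j in range(column):
--             answer[i][j] = arr[i][j]
--     return answer
-- ===== SOURCE B (Python) =====
-- def solution(arr):
--     row, column = len(arr), len(arr[0])
--     size = max(row, column)
--     flat = [arr[k // size][k % size] if k // size < row and k % size < column else 0
--             for k in range(size * size)]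
--     return [flat[i * size:(i + 1) * size] for i in range(size)]
-- ===== Notes on version B (the rewrite author's own statement) =====
-- stated objective: alternative
-- what changed: B linearises the square into one flat list of size*size cells, computing each cell directly from its flat index via divmod (copy if k//size < row and k%size < column, else zero), and then chunks the flat list into rows by slicing, instead of A's preallocated 2-D zero grid overwritten by nested row/column loops.
import Mathlib
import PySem

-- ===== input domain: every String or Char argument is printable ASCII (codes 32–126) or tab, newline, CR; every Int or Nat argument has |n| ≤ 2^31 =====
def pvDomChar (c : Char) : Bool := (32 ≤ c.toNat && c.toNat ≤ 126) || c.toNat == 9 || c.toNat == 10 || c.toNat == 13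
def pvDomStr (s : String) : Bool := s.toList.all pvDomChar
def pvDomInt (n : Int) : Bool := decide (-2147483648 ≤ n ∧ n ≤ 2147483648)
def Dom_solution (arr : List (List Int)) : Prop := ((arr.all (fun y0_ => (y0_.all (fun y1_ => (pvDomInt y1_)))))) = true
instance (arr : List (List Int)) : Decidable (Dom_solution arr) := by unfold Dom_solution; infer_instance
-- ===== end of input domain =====

-- B linearises the square into one flat list of size*size cells computed from divmod on the
-- flat index, then chunks it into rows by slicing, instead of A's zero grid overwritten by
-- nested loops; objective: alternative.

-- ===== PORT A =====
-- transliteration of A: zero grid of size max(row,column), then nested index loops overwrite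
def solution (arr : List (List Int)) : List (List Int) :=
  let row := arr.length
  let column := ((PySem.List.pyGet? arr 0).getD []).length
  let answer := (List.range (max row column)).map (fun _ =>
                  (List.range (max row column)).map (fun _ => (0 : Int)))
  (List.range row).foldl (fun answer i =>
    (List.range column).foldl (fun answer j =>
      answer.set i ((answer.getD i []).set j ((arr.getD i []).getD j 0))) answer) answer

-- ===== PORT B =====
-- transliteration of B: flat list of size*size cells indexed by divmod, then chunked by slicing
def solution_alt (arr : List (List Int)) : List (List Int) :=
  let row := arr.length
  let column := ((PySem.List.pyGet? arr 0).getD []).length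
  let size := max row column
  let flat := (List.range (size * size)).map (fun k =>
    if k / size < row ∧ k % size < column then
      (arr.getD (k / size) []).getD (k % size) 0
    else 0)
  (List.range size).map (fun (i : Nat) =>
    PySem.List.slice flat (some ((i : Int) * (size : Int))) (some (((i : Int) + 1) * (size : Int))))

-- ===== PRECONDITION & SPEC =====
-- Pre_ excludes exactly the inputs where Python A raises IndexError: the empty matrix
-- (arr[0]) and matrices with a row shorter than the first row (arr[i][j]).
def Pre_solution (arr : List (List Int)) : Prop :=
  arr ≠ [] ∧ ∀ r ∈ arr, ((PySem.List.pyGet? arr 0).getD []).length ≤ r.length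
instance (arr : List (List Int)) : Decidable (Pre_solution arr) := by
  unfold Pre_solution; infer_instance
def pvWitness_solution : List (List Int) := [[1, 2], [3, 4]]

def Spec_solution (arr : List (List Int)) (out : List (List Int)) : Prop := out = solution_alt arr
instance (arr : List (List Int)) (out : List (List Int)) : Decidable (Spec_solution arr out) := by unfold Spec_solution; infer_instance

-- ===== CLAIM (what is proved, stated in full; the proofs are below) =====
def Claim_equal_solution : Prop := ∀ (arr : List (List Int)), Dom_solution arr → Pre_solution arr → Spec_solution arr (solution arr)

-- ===== LEMMAS AND PROOFS =====

-- writing f 0 .. f (c-1) into the first c cells of a row = copied prefix ++ untouched tail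
theorem pv_rowset (f : Nat → Int) :
    ∀ (c : Nat) (r : List Int), c ≤ r.length →
      (List.range c).foldl (fun r j => r.set j (f j)) r = (List.range c).map f ++ r.drop c := by
  intro c
  induction c with
  | zero => simp
  | succ c ih =>
    intro r hc
    have hcr : c < r.length := by omega
    rw [List.range_succ, List.foldl_append, ih r (by omega)]
    simp only [List.foldl_cons, List.foldl_nil, List.map_append, List.map_cons, List.map_nil]
    rw [List.set_append]
    simp only [List.length_map, List.length_range]
    rw [if_neg (by omega)]
    rw [List.drop_eq_getElem_cons hcr, Nat.sub_self, List.set_cons_zero]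
    simp

-- the inner loop only rewrites row i, to the rowset fold of that row
theorem pv_inner (i : Nat) (f : Nat → Int) :
    ∀ (c : Nat) (ans : List (List Int)),
      (List.range c).foldl (fun ans j => ans.set i ((ans.getD i []).set j (f j))) ans
        = ans.set i ((List.range c).foldl (fun r j => r.set j (f j)) (ans.getD i [])) := by
  intro c
  induction c with
  | zero =>
    intro ans
    simp only [List.range_zero, List.foldl_nil]
    by_cases h : i < ans.length
    · rw [List.getD_eq_getElem _ [] h, List.set_getElem_self]
    · rw [List.set_eq_of_length_le (Nat.le_of_not_lt h)]
  | succ c ih =>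
    intro ans
    rw [List.range_succ, List.foldl_append, List.foldl_append, ih ans,
        List.foldl_cons, List.foldl_nil, List.foldl_cons, List.foldl_nil]
    by_cases h : i < ans.length
    · have h1 : (ans.set i ((List.range c).foldl (fun r j => r.set j (f j)) (ans.getD i []))).getD i []
          = (List.range c).foldl (fun r j => r.set j (f j)) (ans.getD i []) := by
        rw [List.getD_eq_getElem _ [] (by simpa using h)]
        exact List.getElem_set_self _
      rw [h1, List.set_set]
    · have hn := Nat.le_of_not_lt h
      rw [List.set_eq_of_length_le hn, List.set_eq_of_length_le hn, List.set_eq_of_length_le hn]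

-- the outer loop rewrites each of the first k rows independently
theorem pv_outer (G : Nat → List Int → List Int) :
    ∀ (k : Nat) (ans : List (List Int)), k ≤ ans.length →
      let res := (List.range k).foldl (fun ans i => ans.set i (G i (ans.getD i []))) ans
      res.length = ans.length ∧
        ∀ j, j < ans.length →
          res.getD j [] = if j < k then G j (ans.getD j []) else ans.getD j [] := by
  intro k
  induction k with
  | zero => intro ans _; simp
  | succ k ih =>
    intro ans hk
    obtain ⟨hlen, hget⟩ := ih ans (by omega)
    simp only [List.range_succ, List.foldl_append, List.foldl_cons, List.foldl_nil]
    set res := (List.range k).foldl (fun ans i => ans.set i (G i (ans.getD i []))) ans with hres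
    have hkres : k < res.length := by omega
    constructor
    · simp [hlen]
    · intro j hj
      have hjres : j < res.length := by omega
      have hgk : res.getD k [] = ans.getD k [] := by
        rw [hget k (by omega)]; simp
      by_cases hjk : j = k
      · subst hjk
        rw [List.getD_eq_getElem _ [] (by simpa using hjres), List.getElem_set_self, hgk]
        simp
      · rw [List.getD_eq_getElem _ [] (by simpa using hjres),
            List.getElem_set_ne (by omega), ← List.getD_eq_getElem _ [] hjres, hget j hj]
        rcases Nat.lt_or_ge j k with h | h
        · rw [if_pos h, if_pos (by omega)]
        · rw [if_neg (by omega), if_neg (by omega)]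

theorem pv_zrow (n : Nat) : (List.range n).map (fun _ => (0 : Int)) = List.replicate n 0 := by
  rw [List.map_const']; simp

-- slicing row i out of the flat list = the cells at flat indices i*size .. i*size+size-1
theorem pv_flatrow (f : Nat → Int) (size i : Nat) (hi : i < size) :
    ((((List.range (size * size)).map f).drop (i * size)).take size)
      = (List.range size).map (fun j => f (i * size + j)) := by
  have hle : i * size + size ≤ size * size := by
    calc i * size + size = (i + 1) * size := by ring
    _ ≤ size * size := Nat.mul_le_mul_right _ (by omega)
  refine List.ext_getElem (by simp; omega) ?_
  intro j hj1 hj2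
  have hj : j < size := by simpa using hj2
  simp [List.getElem_take, List.getElem_drop]

-- divmod inverse at a flat index
theorem pv_divmod (i j size : Nat) (hs : 0 < size) (hj : j < size) :
    (i * size + j) / size = i ∧ (i * size + j) % size = j := by
  constructor
  · rw [Nat.add_comm, Nat.add_mul_div_right _ _ hs, Nat.div_eq_of_lt hj]; omega
  · rw [Nat.add_comm, Nat.add_mul_mod_self_right, Nat.mod_eq_of_lt hj]

-- ===== VERDICT (by name: the statement is the Claim_ definition above) =====
theorem solution_spec : Claim_equal_solution := by
  intro arr _ hpre
  unfold Spec_solution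
  simp only [solution, solution_alt]
  set row := arr.length with hrow
  set c := ((PySem.List.pyGet? arr 0).getD []).length with hc
  set m := max row c with hm
  have hrow0 : 0 < row := by
    rcases hpre with ⟨hne, _⟩
    cases arr with
    | nil => exact absurd rfl hne
    | cons a l => simp [hrow]
  have hm0 : 0 < m := by omega
  have hrm : row ≤ m := le_max_left _ _
  have hcm : c ≤ m := le_max_right _ _
  set f : Nat → Int := fun k =>
    if k / m < row ∧ k % m < c then (arr.getD (k / m) []).getD (k % m) 0 else 0 with hf
  set zrow : List Int := (List.range m).map (fun _ => (0 : Int)) with hz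
  set ans0 : List (List Int) := (List.range m).map (fun _ => zrow) with ha0
  have hlen0 : ans0.length = m := by simp [ha0]
  have hzlen : zrow.length = m := by simp [hz]
  -- collapse the inner loop of A
  have hstep : ∀ (ans : List (List Int)) (i : Nat),
      (List.range c).foldl (fun ans j =>
        ans.set i ((ans.getD i []).set j ((arr.getD i []).getD j 0))) ans
      = ans.set i ((List.range c).foldl
          (fun r j => r.set j ((arr.getD i []).getD j 0)) (ans.getD i [])) := by
    intro ans i; exact pv_inner i (fun j => (arr.getD i []).getD j 0) c ans
  simp only [hstep]
  obtain ⟨hlen, hget⟩ := pv_outer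
    (fun i r => (List.range c).foldl (fun r j => r.set j ((arr.getD i []).getD j 0)) r)
    row ans0 (by omega)
  refine List.ext_getElem (by rw [hlen, hlen0]; simp) ?_
  intro i hi1 hi2
  have him : i < m := by simpa using hi2
  have hia : i < ans0.length := by omega
  have h0 : ans0.getD i [] = zrow := by
    rw [List.getD_eq_getElem _ [] hia]; simp [ha0]
  -- the A-side row
  rw [← List.getD_eq_getElem _ [] (by omega : i < _), hget i hia, h0]
  -- the B-side row: slice → drop/take → cells of f
  rw [List.getElem_map, List.getElem_range]
  have hcast : ((i : Int) + 1) * (m : Int) = ((i : Int) * (m : Int)) + ((m : Nat) : Int) := by ring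
  rw [hcast]
  have : ((i : Int) * (m : Int)) = (((i * m : Nat) : Int)) := by push_cast; ring
  rw [this, PySem.List.slice_natCast_add, pv_flatrow f m i him]
  -- compare rows cellwise
  by_cases hir : i < row
  · rw [if_pos hir,
        pv_rowset (fun j' => (arr.getD i []).getD j' 0) c zrow (by omega)]
    rw [hz, pv_zrow, List.drop_replicate]
    refine List.ext_getElem (by simp; omega) ?_
    intro j hj1 hj2
    have hjm : j < m := by simp at hj1; omega
    obtain ⟨hd, hmod⟩ := pv_divmod i j m hm0 hjm
    rw [List.getElem_map, List.getElem_range, hf]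
    simp only [hd, hmod]
    by_cases hjc : j < c
    · rw [if_pos ⟨hir, hjc⟩]
      rw [List.getElem_append_left (by simpa using hjc), List.getElem_map, List.getElem_range]
    · rw [if_neg (by tauto)]
      rw [List.getElem_append_right (by simpa using hjc)]
      simp
  · rw [if_neg hir, hz, pv_zrow]
    refine List.ext_getElem (by simp) ?_
    intro j hj1 hj2
    have hjm : j < m := by simpa using hj1
    obtain ⟨hd, hmod⟩ := pv_divmod i j m hm0 hjm
    rw [List.getElem_map, List.getElem_range, hf]
    simp only [hd, hmod]
    rw [if_neg (by tauto)]
    simp
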